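-- pv_equiv track=rewrite | github.com/IlMinCho/Algorithm | baekjoon/1343.py | cover_polyomino
-- ===== SOURCE A (Python) =====
-- def cover_polyomino(board):
--     result = []
--     i = 0
--     while i < len(board):
--         if board[i] == 'X':
--             count = 0
--             while i < len(board) and board[i] == 'X':
--                 count += 1
--                 i += 1
--             if count % 2 != 0:  # 'X'의 길이가 홀수이면 덮을 수 없다.
--                 return "-1"
--             result.append('AAAA' * (count // 4) + 'BB' * ((count % 4) // 2))
--         else:
--             result.append('.')
--             i += 1
--     return ''.join(result)
-- ===== SOURCE B (Python) =====
-- def cover_polyomino(board):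
--     # Normalise every non-'X' char to '.', then split on '.': the pieces are
--     # exactly the maximal 'X' runs, and re-joining their tilings with '.'
--     # restores the board shape.
--     runs = ''.join('X' if c == 'X' else '.' for c in board).split('.')
--     if any(len(r) % 2 for r in runs):
--         return "-1"
--     return '.'.join('AAAA' * (len(r) // 4) + 'BB' * ((len(r) % 4) // 2) for r in runs)
-- ===== Notes on version B (the rewrite author's own statement) =====
-- stated objective: simpler
-- what changed: Replaces A's manual index-based while-loop run scanner with a string pipeline: normalise every non-'X' char to '.', split on '.' to get the maximal X runs, fail if any has odd length, else join the tilings back with '.'.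
import Mathlib
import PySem

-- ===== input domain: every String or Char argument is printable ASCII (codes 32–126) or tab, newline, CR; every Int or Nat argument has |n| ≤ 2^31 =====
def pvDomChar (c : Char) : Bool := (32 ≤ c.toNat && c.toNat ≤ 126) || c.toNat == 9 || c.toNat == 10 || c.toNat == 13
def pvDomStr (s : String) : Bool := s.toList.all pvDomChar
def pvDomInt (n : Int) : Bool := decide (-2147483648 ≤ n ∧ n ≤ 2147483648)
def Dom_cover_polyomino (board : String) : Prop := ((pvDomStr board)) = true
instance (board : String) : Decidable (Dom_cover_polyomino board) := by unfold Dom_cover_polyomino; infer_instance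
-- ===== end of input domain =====

-- B replaces A's manual index-based run scanner by normalise / split-on-'.' / re-join (objective: simpler); return values agree on all inputs.

-- shared helper: both Pythons contain literally 'AAAA'*(n//4) + 'BB'*((n%4)//2)
def tileX (n : Nat) : List Char :=
  (List.replicate (n / 4) ['A','A','A','A']).flatten ++
  (List.replicate ((n % 4) / 2) ['B','B']).flatten

-- ===== PORT A =====
-- the inner `while i < len(board) and board[i] == 'X'` loop: counts the
-- leading 'X' run and returns the remainder
def spanX : List Char → Nat × List Char
  | [] => (0, [])
  | c :: r => if c = 'X' then ((spanX r).1 + 1, (spanX r).2) else (0, c :: r)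

theorem spanX_len (l : List Char) : (spanX l).1 + (spanX l).2.length = l.length := by
  induction l with
  | nil => simp [spanX]
  | cons c r ih =>
    by_cases h : c = 'X' <;> simp [spanX, h] <;> omega

-- outer while loop; none models the early `return "-1"`, strings are built as char lists
def aLoop (l : List Char) : Option (List Char) :=
  match l with
  | [] => some []
  | c :: r =>
    if c = 'X' then
      let n := (spanX (c :: r)).1
      if n % 2 ≠ 0 then none
      else
        match aLoop (spanX (c :: r)).2 with
        | none => none
        | some cs => some (tileX n ++ cs)
    else
      match aLoop r with
      | none => none
      | some cs => some ('.' :: cs)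
termination_by l.length
decreasing_by
  · have h1 := spanX_len (c :: r)
    have : (spanX (c :: r)).1 ≥ 1 := by simp_all [spanX]
    simp at h1 ⊢; omega
  · simp

def cover_polyomino (board : String) : String :=
  match aLoop board.toList with
  | none => "-1"
  | some cs => String.mk cs

-- ===== PORT B =====
-- ''.join('X' if c == 'X' else '.' for c in board)
def normDots (l : List Char) : List Char := l.map (fun c => if c = 'X' then 'X' else '.')

-- str.split('.') on a char list
def splitDot : List Char → List (List Char)
  | [] => [[]]
  | c :: r =>
    if c = '.' then [] :: splitDot r
    else
      match splitDot r with
      | [] => [[c]]   -- unreachable: splitDot never returns []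
      | g :: gs => (c :: g) :: gs

def cover_polyomino_alt (board : String) : String :=
  let runs := splitDot (normDots board.toList)
  if runs.any (fun g => g.length % 2 = 1) then "-1"
  else String.mk (List.intercalate ['.'] (runs.map (fun g => tileX g.length)))

-- ===== PRECONDITION & SPEC =====
def Spec_cover_polyomino (board : String) (out : String) : Prop := out = cover_polyomino_alt board
instance (board : String) (out : String) : Decidable (Spec_cover_polyomino board out) := by unfold Spec_cover_polyomino; infer_instance

-- ===== CLAIM (what is proved, stated in full; the proofs are below) =====
def Claim_equal_cover_polyomino : Prop := ∀ (board : String), Dom_cover_polyomino board → Spec_cover_polyomino board (cover_polyomino board)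

-- ===== LEMMAS AND PROOFS =====

-- B's pipeline after the toList/normalisation, as one function of the char list
def bCore (l : List Char) : Option (List Char) :=
  let runs := splitDot (normDots l)
  if runs.any (fun g => g.length % 2 = 1) then none
  else some (List.intercalate ['.'] (runs.map (fun g => tileX g.length)))

theorem splitDot_ne_nil (l : List Char) : splitDot l ≠ [] := by
  cases l with
  | nil => simp [splitDot]
  | cons c r =>
    simp only [splitDot]
    split
    · simp
    · split <;> simp

theorem normDots_cons_notX {c : Char} (r : List Char) (h : c ≠ 'X') :
    splitDot (normDots (c :: r)) = [] :: splitDot (normDots r) := by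
  simp [normDots, splitDot, h]

-- the maximal leading 'X' run becomes the first piece of B's split
theorem splitDot_spanX (l : List Char) (h : l.head? = some 'X') :
    ∃ gs, splitDot (normDots (spanX l).2) = [] :: gs ∧
      splitDot (normDots l) = List.replicate (spanX l).1 'X' :: gs := by
  induction l with
  | nil => simp at h
  | cons c r ih =>
    simp at h; subst h
    cases r with
    | nil =>
      exact ⟨[], by simp [spanX, normDots, splitDot]⟩
    | cons d r' =>
      by_cases hd : d = 'X'
      · subst hd
        obtain ⟨gs, h1, h2⟩ := ih (by simp)
        refine ⟨gs, ?_, ?_⟩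
        · simpa [spanX] using h1
        · have : normDots ('X' :: 'X' :: r') = 'X' :: normDots ('X' :: r') := by
            simp [normDots]
          rw [this, splitDot]
          simp only [show ('X' : Char) ≠ '.' by decide, if_neg]
          rw [h2]
          simp [spanX, List.replicate_succ]
      · refine ⟨splitDot (normDots (d :: r')).tail, ?_, ?_⟩ <;>
          simp [spanX, hd, normDots, splitDot]

-- join-shifting: A emits the tile and lets the next non-'X' char produce the
-- '.', B's intercalate produces the same '.' before the next (empty-led) piece
theorem intercalate_cons_ne (a : List Char) (gs : List (List Char)) (h : gs ≠ []) :
    List.intercalate ['.'] (a :: gs) = a ++ '.' :: List.intercalate ['.'] gs := by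
  cases gs with
  | nil => exact absurd rfl h
  | cons b t => simp [List.intercalate, List.intersperse]

theorem shift_tile (n : Nat) (ts : List (List Char)) :
    tileX n ++ List.intercalate ['.'] ([] :: ts) = List.intercalate ['.'] (tileX n :: ts) := by
  cases ts with
  | nil => simp [List.intercalate]
  | cons b t =>
    rw [intercalate_cons_ne [] (b :: t) (by simp), intercalate_cons_ne (tileX n) (b :: t) (by simp)]
    simp

-- core equivalence: A's scanning loop computes B's pipeline (bounded induction on length)
theorem aLoop_eq_bCore_aux : ∀ (n : Nat) (l : List Char), l.length ≤ n → aLoop l = bCore l := by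
  intro n
  induction n with
  | zero =>
    intro l h
    have : l = [] := List.length_eq_zero_iff.mp (Nat.le_zero.mp h)
    subst this
    simp [aLoop, bCore, normDots, splitDot, List.intercalate, tileX]
  | succ n ih =>
    intro l hl
    cases l with
    | nil => simp [aLoop, bCore, normDots, splitDot, List.intercalate, tileX]
    | cons c r =>
      by_cases hc : c = 'X'
      · subst hc
        obtain ⟨gs, hrest, hsplit⟩ := splitDot_spanX ('X' :: r) (by simp)
        have hlen := spanX_len ('X' :: r)
        have hpos : 1 ≤ (spanX ('X' :: r)).1 := by simp [spanX]
        have hih : aLoop (spanX ('X' :: r)).2 = bCore (spanX ('X' :: r)).2 := by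
          apply ih
          simp at hl hlen
          omega
        rw [aLoop]
        simp only [if_pos rfl, hih]
        unfold bCore
        rw [hrest, hsplit]
        simp only [List.any_cons, List.length_replicate, List.length_nil,
          Nat.zero_mod, List.map_cons, List.length_nil]
        by_cases hodd : (spanX ('X' :: r)).1 % 2 = 1
        · simp [hodd, Nat.mod_two_ne_zero]
        · have h0 : ¬ (spanX ('X' :: r)).1 % 2 ≠ 0 := by omega
          simp only [hodd, h0, decide_true, decide_false, Bool.false_or, if_neg h0,
            ite_not, if_true]
          by_cases hany : gs.any (fun g => g.length % 2 = 1) = true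
          · simp [hany]
          · simp only [Bool.not_eq_true] at hany
            have h00 : tileX 0 = [] := by decide
            simp [hany, h00, shift_tile]
      · have hih : aLoop r = bCore r := ih r (by simpa using Nat.lt_succ_iff.mp (by simpa using hl))
        rw [aLoop]
        simp only [if_neg hc, hih]
        unfold bCore
        rw [normDots_cons_notX r hc]
        simp only [List.any_cons, List.length_nil, Nat.zero_mod, List.map_cons]
        have hne : splitDot (normDots r) ≠ [] := splitDot_ne_nil _
        by_cases hany : (splitDot (normDots r)).any (fun g => g.length % 2 = 1) = true
        · simp [hany]
        · simp only [Bool.not_eq_true] at hany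
          have h00 : tileX 0 = [] := by decide
          have hne' : (splitDot (normDots r)).map (fun g => tileX g.length) ≠ [] := by
            simpa using hne
          simp only [hany, h00, decide_false, Bool.false_or, if_false, Bool.false_eq_true]
          rw [intercalate_cons_ne [] _ hne']
          simp

theorem aLoop_eq_bCore (l : List Char) : aLoop l = bCore l :=
  aLoop_eq_bCore_aux l.length l le_rfl

-- ===== VERDICT (by name: the statement is the Claim_ definition above) =====
theorem cover_polyomino_spec : Claim_equal_cover_polyomino := by
  intro board _
  unfold Spec_cover_polyomino cover_polyomino cover_polyomino_alt
  have h := aLoop_eq_bCore board.toList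
  unfold bCore at h
  simp only at h
  split at h <;> simp_all
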